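-- pv_equiv track=rewrite | github.com/Aasthaengg/IBMdataset | Python_codes/p03687/s047295079.py | solve
-- ===== SOURCE A (Python) =====
-- from collections import defaultdict
--
-- def solve(s):
--     z = defaultdict(list)
--     for i in range(len(s)):
--         z[s[i]].append(i)
--     ans = 99999
--     for k, v in z.items():
--         prev = -1
--         diffmax = 0
--         for i in v:
--             diffmax = max(diffmax, i-prev-1)
--             prev = i
--         diffmax = max(diffmax, len(s)-v[-1]-1)
--         ans = min(ans, diffmax)
--     return ans
-- ===== SOURCE B (Python) =====
-- def solve(s):
--     last = {}
--     gap = {}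
--     for i, c in enumerate(s):
--         cand = i - last.get(c, -1) - 1
--         gap[c] = max(gap.get(c, 0), cand)
--         last[c] = i
--     n = len(s)
--     ans = 99999
--     for c, g in gap.items():
--         ans = min(ans, max(g, n - last[c] - 1))
--     return ans
-- ===== Notes on version B (the rewrite author's own statement) =====
-- stated objective: alternative
-- what changed: Replaces the build-per-character-index-lists-then-rescan structure with a single streaming pass that maintains dicts last[c]/gap[c] and folds in the trailing gap in one closing pass over the seen characters.
import Mathlib
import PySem

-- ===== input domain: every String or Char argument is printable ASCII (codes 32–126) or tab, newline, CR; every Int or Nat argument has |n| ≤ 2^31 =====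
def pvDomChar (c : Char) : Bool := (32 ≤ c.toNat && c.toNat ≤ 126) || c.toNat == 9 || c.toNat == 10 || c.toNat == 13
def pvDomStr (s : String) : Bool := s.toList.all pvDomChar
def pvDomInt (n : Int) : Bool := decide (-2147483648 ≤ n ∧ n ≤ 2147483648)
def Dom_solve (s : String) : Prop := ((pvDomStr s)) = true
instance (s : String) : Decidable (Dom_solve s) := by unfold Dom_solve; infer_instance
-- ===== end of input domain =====

-- B streams once over the string with last/gap dicts instead of building per-character index lists and rescanning them (alternative decomposition, same cost).

-- ===== PORT A =====
-- z = defaultdict(list); for i in range(len(s)): z[s[i]].append(i)   (fold over enumerate: same iterations, s[i] is the char at i)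
-- then for each (k, v): inner fold (diffmax, prev) with init (0, -1); v[-1] via pyGetD with default 0 — v is never empty, so the default is never used (exact).
def solve (s : String) : Int :=
  let cs := s.toList
  let n : Int := cs.length
  let z : PySem.Dict Char (List Int) :=
    (PySem.List.enumerate cs).foldl (fun z p => z.modify p.2 [] (· ++ [p.1])) PySem.Dict.empty
  z.items.foldl (fun ans kv =>
    let dp := kv.2.foldl (fun (dp : Int × Int) i => (max dp.1 (i - dp.2 - 1), i)) ((0 : Int), (-1 : Int))
    min ans (max dp.1 (n - PySem.List.pyGetD kv.2 (-1) 0 - 1))) 99999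

-- ===== PORT B =====
-- one streaming step of Source B's loop: cand = i - last.get(c,-1) - 1; gap[c] = max(gap.get(c,0), cand); last[c] = i
def pvStep (st : PySem.Dict Char Int × PySem.Dict Char Int) (p : Int × Char) :
    PySem.Dict Char Int × PySem.Dict Char Int :=
  (st.1.insert p.2 p.1, st.2.insert p.2 (max (st.2.getD p.2 0) (p.1 - st.1.getD p.2 (-1) - 1)))

-- last[c] in the closing pass via getD with default 0 — c is a key of gap, hence of last, so the default is never used (exact).
def solve_alt (s : String) : Int :=
  let cs := s.toList
  let n : Int := cs.length
  let st := (PySem.List.enumerate cs).foldl pvStep (PySem.Dict.empty, PySem.Dict.empty)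
  st.2.items.foldl (fun ans kv => min ans (max kv.2 (n - st.1.getD kv.1 0 - 1))) 99999

-- ===== PRECONDITION & SPEC =====
def Spec_solve (s : String) (out : Int) : Prop := out = solve_alt s
instance (s : String) (out : Int) : Decidable (Spec_solve s out) := by unfold Spec_solve; infer_instance

-- ===== CLAIM (what is proved, stated in full; the proofs are below) =====
def Claim_equal_solve : Prop := ∀ (s : String), Dom_solve s → Spec_solve s (solve s)

-- ===== LEMMAS AND PROOFS =====

/-- indices (in order) at which character `c` occurs in the pair list `l`. -/
def pvOcc (c : Char) (l : List (Int × Char)) : List Int :=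
  (l.filter (fun p => p.2 == c)).map (·.1)

/-- A's inner (diffmax, prev) fold. -/
def pvF (dp : Int × Int) (v : List Int) : Int × Int :=
  v.foldl (fun dp i => (max dp.1 (i - dp.2 - 1), i)) dp

theorem pvGetLast?_cons (l : List Int) (x : Int) (h : l ≠ []) :
    (x :: l).getLast? = l.getLast? := by
  simp [List.getLast?_cons, Option.getD]
  cases hl : l.getLast? with
  | none => exact absurd (List.getLast?_eq_none_iff.mp hl) h
  | some y => rfl

theorem pvOcc_cons (c : Char) (p : Int × Char) (l : List (Int × Char)) :
    pvOcc c (p :: l) = if p.2 = c then p.1 :: pvOcc c l else pvOcc c l := by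
  by_cases h : p.2 = c <;> simp [pvOcc, h]

theorem keys_insert_add {κ ν : Type} [BEq κ] [LawfulBEq κ]
    (d : PySem.Dict κ ν) (k : κ) (v : ν) :
    (d.insert k v).keys = PySem.Set.add d.keys k := by
  by_cases h : d.contains k
  · rw [PySem.Dict.keys_insert_of_contains _ _ h,
      PySem.Set.add_of_mem ((PySem.Dict.contains_iff_mem_keys _ _).mp h)]
  · rw [PySem.Dict.keys_insert_of_not_contains _ _ (by simpa using h),
      PySem.Set.add_of_not_mem]
    intro hm
    exact h ((PySem.Dict.contains_iff_mem_keys _ _).mpr hm)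

/-- No occurrence of `c` in `l`: both dicts' entries at `c` are untouched. -/
theorem pvStep_none (l : List (Int × Char)) (st : PySem.Dict Char Int × PySem.Dict Char Int)
    (c : Char) (h : pvOcc c l = []) :
    (l.foldl pvStep st).1.get? c = st.1.get? c ∧ (l.foldl pvStep st).2.get? c = st.2.get? c := by
  induction l generalizing st with
  | nil => exact ⟨rfl, rfl⟩
  | cons p l ih =>
    rw [pvOcc_cons] at h
    by_cases hc : p.2 = c
    · simp [hc] at h
    · simp only [if_neg hc] at h
      have := ih (pvStep st p) h
      simp only [List.foldl_cons] at *
      refine ⟨?_, ?_⟩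
      · rw [this.1, pvStep, PySem.Dict.get?_insert_of_ne _ _ (Ne.symm hc)]
      · rw [this.2, pvStep, PySem.Dict.get?_insert_of_ne _ _ (Ne.symm hc)]

/-- B's streamed (gap, last) entry at `c` is A's inner fold over `c`'s occurrence list. -/
theorem pvStep_F (l : List (Int × Char)) (st : PySem.Dict Char Int × PySem.Dict Char Int)
    (c : Char) :
    ((l.foldl pvStep st).2.getD c 0, (l.foldl pvStep st).1.getD c (-1))
      = pvF (st.2.getD c 0, st.1.getD c (-1)) (pvOcc c l) := by
  induction l generalizing st with
  | nil => rfl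
  | cons p l ih =>
    rw [pvOcc_cons]
    by_cases hc : p.2 = c
    · subst hc
      simp only [List.foldl_cons, pvF, List.foldl_cons]
      rw [ih]
      simp [pvStep, PySem.Dict.getD_insert_self, pvF]
    · simp only [List.foldl_cons, if_neg hc]
      rw [ih]
      simp [pvStep, PySem.Dict.getD_insert_of_ne _ _ _ (Ne.symm hc)]

/-- When `c` occurs, B's `last[c]` is the last occurrence index. -/
theorem pvStep_last (l : List (Int × Char)) (st : PySem.Dict Char Int × PySem.Dict Char Int)
    (c : Char) (h : pvOcc c l ≠ []) :
    (l.foldl pvStep st).1.get? c = (pvOcc c l).getLast? := by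
  induction l generalizing st with
  | nil => exact absurd rfl h
  | cons p l ih =>
    rw [pvOcc_cons] at *
    by_cases hc : p.2 = c
    · simp only [if_pos hc] at *
      by_cases h2 : pvOcc c l = []
      · rw [List.foldl_cons, (pvStep_none l _ c h2).1, h2, pvStep]
        simp only
        rw [← hc, PySem.Dict.get?_insert_self]
        rfl
      · rw [List.foldl_cons, ih _ h2, pvGetLast?_cons _ _ h2]
    · simp only [if_neg hc] at *
      rw [List.foldl_cons, ih _ h]

/-- A's grouping fold: the list stored at `c` is `c`'s occurrence list. -/
theorem pvGroup_getD (l : List (Int × Char)) (z : PySem.Dict Char (List Int)) (c : Char) :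
    (l.foldl (fun z p => z.modify p.2 [] (· ++ [p.1])) z).getD c []
      = z.getD c [] ++ pvOcc c l := by
  induction l generalizing z with
  | nil => simp [pvOcc]
  | cons p l ih =>
    rw [List.foldl_cons, ih, pvOcc_cons]
    by_cases hc : p.2 = c
    · subst hc
      rw [PySem.Dict.getD_modify_self]
      simp
    · rw [PySem.Dict.getD_modify_of_ne _ _ _ (Ne.symm hc), if_neg hc]

/-- Keys of B's two streamed dicts. -/
theorem pvStep_keys (l : List (Int × Char)) (st : PySem.Dict Char Int × PySem.Dict Char Int) :
    (l.foldl pvStep st).1.keys = PySem.Set.update st.1.keys (l.map (·.2))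
      ∧ (l.foldl pvStep st).2.keys = PySem.Set.update st.2.keys (l.map (·.2)) := by
  induction l generalizing st with
  | nil => exact ⟨rfl, rfl⟩
  | cons p l ih =>
    have := ih (pvStep st p)
    constructor
    · rw [List.foldl_cons, this.1, List.map_cons, PySem.Set.update_cons, pvStep]
      simp only
      rw [keys_insert_add]
    · rw [List.foldl_cons, this.2, List.map_cons, PySem.Set.update_cons, pvStep]
      simp only
      rw [keys_insert_add]

theorem pvOcc_ne_nil_of_mem (l : List (Int × Char)) (c : Char) (h : c ∈ l.map (·.2)) :
    pvOcc c l ≠ [] := by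
  obtain ⟨p, hp, hpc⟩ := List.mem_map.mp h
  intro hnil
  have : l.filter (fun p => p.2 == c) = [] := by
    cases hf : l.filter (fun p => p.2 == c) with
    | nil => rfl
    | cons q t => rw [pvOcc, hf] at hnil; simp at hnil
  rw [List.filter_eq_nil_iff] at this
  exact absurd (by simp [hpc]) (this p hp)

theorem solve_eq_alt (s : String) : solve s = solve_alt s := by
  unfold solve solve_alt
  simp only
  set cs := s.toList with hcs
  set n : Int := (cs.length : Int) with hn
  set l := PySem.List.enumerate cs with hl
  set z := l.foldl (fun z p => z.modify p.2 [] (· ++ [p.1]))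
      (PySem.Dict.empty : PySem.Dict Char (List Int)) with hz
  set st := l.foldl pvStep ((PySem.Dict.empty, PySem.Dict.empty) :
      PySem.Dict Char Int × PySem.Dict Char Int) with hst
  -- common key list
  have hzkeys : z.keys = PySem.Set.ofList (l.map (·.2)) := by
    rw [hz, PySem.Dict.keys_foldl_modify_key]
    simp only [PySem.Dict.keys_empty]
    exact PySem.Set.update_nil_left _
  have hstkeys := pvStep_keys l (PySem.Dict.empty, PySem.Dict.empty)
  have hgkeys : st.2.keys = PySem.Set.ofList (l.map (·.2)) := by
    rw [hst, hstkeys.2]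
    simp only [PySem.Dict.keys_empty]
    exact PySem.Set.update_nil_left _
  have hznd : z.keys.Nodup := by rw [hzkeys]; exact PySem.Set.nodup_ofList _
  have hgnd : st.2.keys.Nodup := by rw [hgkeys]; exact PySem.Set.nodup_ofList _
  rw [PySem.Dict.items_eq_map_keys z hznd [], PySem.Dict.items_eq_map_keys st.2 hgnd 0,
    hzkeys, hgkeys, List.foldl_map, List.foldl_map]
  apply PySem.List.foldl_congr_mem
  intro ans c hc
  have hcmem : c ∈ l.map (·.2) := (PySem.Set.mem_ofList _ _).mp hc
  have hocc : pvOcc c l ≠ [] := pvOcc_ne_nil_of_mem l c hcmem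
  have hzc : z.getD c [] = pvOcc c l := by
    rw [hz, pvGroup_getD]; simp [PySem.Dict.getD_empty]
  have hF := pvStep_F l (PySem.Dict.empty, PySem.Dict.empty) c
  simp only [PySem.Dict.getD_empty] at hF
  rw [← hst] at hF
  have hgap : st.2.getD c 0 = (pvF (0, -1) (pvOcc c l)).1 := congrArg Prod.fst hF
  have hlastq := pvStep_last l (PySem.Dict.empty, PySem.Dict.empty) c hocc
  rw [← hst] at hlastq
  have hlast : st.1.getD c 0 = (pvOcc c l).getLast hocc := by
    rw [PySem.Dict.getD_eq_get?_getD, hlastq, List.getLast?_eq_some_getLast hocc]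
    rfl
  have hpy : PySem.List.pyGetD (pvOcc c l) (-1) 0 = (pvOcc c l).getLast hocc :=
    PySem.List.pyGetD_neg_one _ _ hocc
  simp only [hzc, hgap, hlast, hpy, pvF]

-- ===== VERDICT (by name: the statement is the Claim_ definition above) =====
theorem solve_spec : Claim_equal_solve := by
  intro s _
  unfold Spec_solve
  exact solve_eq_alt s
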